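-- pv_equiv track=rewrite | github.com/paiml/depyler | examples/hard_suffix_operations.py | longest_suffix_palindrome_len
-- ===== SOURCE A (Python) =====
-- def longest_suffix_palindrome_len(s: str) -> int:
--     """Length of the longest suffix of s that is a palindrome."""
--     n: int = len(s)
--     best: int = 0
--     start: int = n - 1
--     while start >= 0:
--         length: int = n - start
--         is_pal: int = 1
--         lo: int = start
--         hi: int = n - 1
--         while lo < hi:
--             if s[lo] != s[hi]:
--                 is_pal = 0
--                 lo = hi
--             else:
--                 lo = lo + 1
--                 hi = hi - 1
--         if is_pal == 1 and length > best:
--             best = length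
--         start = start - 1
--     return best
-- ===== SOURCE B (Python) =====
-- def longest_suffix_palindrome_len(s: str) -> int:
--     """Length of the longest suffix of s that is a palindrome.
--
--     KMP prefix function of t = reverse(s) + '\x00' + s: a suffix of s of
--     length L is a palindrome iff it equals the length-L prefix of reverse(s),
--     so the prefix-function value at the last position of t is the answer.
--     """
--     t = s[::-1] + "\x00" + s
--     m = len(t)
--     pi = [0] * m
--     k = 0
--     for i in range(1, m):
--         while k > 0 and t[i] != t[k]:
--             k = pi[k - 1]
--         if t[i] == t[k]:
--             k += 1
--         pi[i] = k
--     return pi[m - 1]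
-- ===== Notes on version B (the rewrite author's own statement) =====
-- stated objective: faster
-- what changed: Replaces A's O(n^2) scan that re-checks every suffix with a two-pointer palindrome test by a single KMP prefix-function pass over reverse(s) + '\x00' + s, whose last value is the longest palindromic suffix length.
import Mathlib
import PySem

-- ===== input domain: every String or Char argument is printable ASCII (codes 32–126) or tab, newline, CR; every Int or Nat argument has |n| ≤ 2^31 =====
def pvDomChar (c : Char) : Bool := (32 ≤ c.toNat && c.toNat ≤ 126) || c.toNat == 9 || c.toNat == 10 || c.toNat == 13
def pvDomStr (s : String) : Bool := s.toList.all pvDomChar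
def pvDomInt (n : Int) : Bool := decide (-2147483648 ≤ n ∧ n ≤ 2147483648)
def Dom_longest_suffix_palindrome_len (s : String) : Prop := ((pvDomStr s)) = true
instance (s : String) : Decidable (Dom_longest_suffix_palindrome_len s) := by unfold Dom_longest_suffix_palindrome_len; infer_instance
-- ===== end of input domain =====

-- B replaces A's per-suffix two-pointer palindrome checks by the KMP prefix function of
-- reverse(s) + '\x00' + s, whose last value is the length of the longest palindromic suffix.

-- ===== PORT A =====
-- inner 'while lo < hi' loop of A; on mismatch A sets lo = hi and falls out with is_pal = 0,
-- so the recursion returns 0 there. Indices are always in range when called from pvOuterA.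
def pvInnerA (cs : List Char) (lo hi : Int) : Int :=
  if lo < hi then
    match PySem.List.pyGet? cs lo, PySem.List.pyGet? cs hi with
    | some a, some b => if a ≠ b then 0 else pvInnerA cs (lo + 1) (hi - 1)
    | _, _ => 0   -- unreachable for in-range indices (Python would raise IndexError)
  else 1
termination_by (hi - lo).toNat
decreasing_by omega

-- outer 'while start >= 0' loop of A, carrying best
def pvOuterA (cs : List Char) (n best start : Int) : Int :=
  if h : 0 ≤ start then
    let len := n - start
    let is_pal := pvInnerA cs start (n - 1)
    pvOuterA cs n (if is_pal = 1 ∧ len > best then len else best) (start - 1)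
  else best
termination_by (start + 1).toNat
decreasing_by omega

def longest_suffix_palindrome_len (s : String) : Int :=
  pvOuterA s.toList (s.toList.length : Int) 0 ((s.toList.length : Int) - 1)

-- ===== PORT B =====
-- 'while k > 0 and t[i] != t[k]: k = pi[k - 1]' — fuel (k.toNat + 1) only makes the
-- recursion total; the loop strictly decreases k, so the fuel is never exhausted.
-- pi[k - 1] is always in range in Python; '.getD 0' is on that unreachable none path.
def pvKmpInner (pi : List Int) (t : List Char) (i : Int) : Nat → Int → Int
  | 0, k => k
  | fuel+1, k =>
    if 0 < k ∧ PySem.List.pyGet? t i ≠ PySem.List.pyGet? t k then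
      pvKmpInner pi t i fuel ((PySem.List.pyGet? pi (k - 1)).getD 0)
    else k

-- body of one iteration of 'for i in range(1, m)': run the while loop, then
-- 'if t[i] == t[k]: k += 1'
def pvKmpStep (pi : List Int) (t : List Char) (i : Nat) (k : Int) : Int :=
  let k1 := pvKmpInner pi t (i : Int) (k.toNat + 1) k
  if PySem.List.pyGet? t (i : Int) = PySem.List.pyGet? t k1 then k1 + 1 else k1

-- 'for i in range(1, m): … ; pi[i] = k'
def pvKmpGo (t : List Char) (m i : Nat) (k : Int) (pi : List Int) : List Int :=
  if i < m then pvKmpGo t m (i+1) (pvKmpStep pi t i k) (pi.set i (pvKmpStep pi t i k)) else pi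
termination_by m - i

-- t = s[::-1] + '\x00' + s; pi = [0]*len(t); KMP loop; return pi[len(t)-1] (always in range)
def longest_suffix_palindrome_len_alt (s : String) : Int :=
  let t := s.toList.reverse ++ Char.ofNat 0 :: s.toList
  (PySem.List.pyGet? (pvKmpGo t t.length 1 0 (List.replicate t.length 0)) ((t.length : Int) - 1)).getD 0

-- ===== PRECONDITION & SPEC =====
def Spec_longest_suffix_palindrome_len (s : String) (out : Int) : Prop := out = longest_suffix_palindrome_len_alt s
instance (s : String) (out : Int) : Decidable (Spec_longest_suffix_palindrome_len s out) := by unfold Spec_longest_suffix_palindrome_len; infer_instance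

-- ===== CLAIM (what is proved, stated in full; the proofs are below) =====
def Claim_equal_longest_suffix_palindrome_len : Prop := ∀ (s : String), Dom_longest_suffix_palindrome_len s → Spec_longest_suffix_palindrome_len s (longest_suffix_palindrome_len s)

-- ===== LEMMAS AND PROOFS =====

-- 'k is a proper border of t': the length-k prefix equals the length-k suffix
abbrev Brd (t : List Char) (k : Nat) : Prop := k < t.length ∧ t.take k = t.drop (t.length - k)

-- length of the longest proper border
def mb (t : List Char) : Nat := Nat.findGreatest (Brd t) (t.length - 1)

-- 'the length-L suffix of cs is a palindrome'
abbrev PalSuf (cs : List Char) (L : Nat) : Prop :=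
  cs.drop (cs.length - L) = (cs.drop (cs.length - L)).reverse

lemma brd_iff (t : List Char) (k : Nat) :
    Brd t k ↔ k < t.length ∧ ∀ j, j < k → t[j]? = t[t.length - k + j]? := by
  constructor
  · rintro ⟨hk, h⟩
    refine ⟨hk, fun j hj => ?_⟩
    have h' := congrArg (fun l => l[j]?) h
    simp only [List.getElem?_take, List.getElem?_drop, if_pos hj] at h'
    exact h'
  · rintro ⟨hk, h⟩
    refine ⟨hk, List.ext_getElem? fun j => ?_⟩
    rw [List.getElem?_take, List.getElem?_drop]
    by_cases hj : j < k
    · rw [if_pos hj]; exact h j hj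
    · rw [if_neg hj]
      exact (List.getElem?_eq_none (by omega)).symm

lemma brd_zero {t : List Char} (h : 0 < t.length) : Brd t 0 := ⟨h, by simp⟩

lemma mb_brd {t : List Char} (h : 0 < t.length) : Brd t (mb t) :=
  Nat.findGreatest_spec (Nat.zero_le _) (brd_zero h)

lemma mb_ge {t : List Char} {k : Nat} (h : Brd t k) : k ≤ mb t :=
  Nat.le_findGreatest (by have := h.1; omega) h

lemma brd_ext (t : List Char) (i k : Nat) (hi : i < t.length) :
    Brd (t.take (i+1)) (k+1) ↔ (Brd (t.take i) k ∧ t[k]? = t[i]?) := by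
  have hlen1 : (t.take (i+1)).length = i+1 := by rw [List.length_take]; omega
  have hlen0 : (t.take i).length = i := by rw [List.length_take]; omega
  simp only [brd_iff, hlen1, hlen0]
  constructor
  · rintro ⟨hk1, h⟩
    have hk : k < i := by omega
    have key : ∀ j, j < k+1 → t[j]? = t[i - k + j]? := by
      intro j hj
      have h' := h j hj
      rw [List.getElem?_take, if_pos (by omega), List.getElem?_take, if_pos (by omega)] at h'
      rwa [show i + 1 - (k+1) + j = i - k + j by omega] at h'
    refine ⟨⟨hk, fun j hj => ?_⟩, ?_⟩
    · rw [List.getElem?_take, if_pos (by omega), List.getElem?_take, if_pos (by omega)]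
      exact key j (by omega)
    · have := key k (by omega)
      rwa [show i - k + k = i by omega] at this
  · rintro ⟨⟨hk, h⟩, hki⟩
    refine ⟨by omega, fun j hj => ?_⟩
    rw [List.getElem?_take, if_pos (by omega), List.getElem?_take, if_pos (by omega)]
    rw [show i + 1 - (k+1) + j = i - k + j by omega]
    by_cases hjk : j < k
    · have h' := h j hjk
      rw [List.getElem?_take, if_pos (by omega), List.getElem?_take, if_pos (by omega)] at h'
      exact h'
    · have hj' : j = k := by omega
      subst hj'
      rw [show i - j + j = i by omega]
      exact hki

-- a border of a border is a border
lemma brd_trans {t : List Char} {c j : Nat} (hc : Brd t c) (hj : Brd (t.take c) j) : Brd t j := by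
  obtain ⟨hc1, hcf⟩ := (brd_iff t c).mp hc
  obtain ⟨hj1, hjf⟩ := (brd_iff (t.take c) j).mp hj
  have hlc : (t.take c).length = c := by rw [List.length_take]; omega
  rw [hlc] at hj1
  refine (brd_iff t j).mpr ⟨by omega, fun x hx => ?_⟩
  have h1 := hjf x hx
  rw [hlc] at h1
  rw [List.getElem?_take, if_pos (by omega), List.getElem?_take, if_pos (by omega)] at h1
  have h2 := hcf (c - j + x) (by omega)
  rw [show t.length - c + (c - j + x) = t.length - j + x by omega] at h2
  rw [h1]; exact h2

-- a shorter border restricts to a border of a longer border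
lemma brd_take {t : List Char} {c j : Nat} (hbj : Brd t j) (hbc : Brd t c) (hjc : j < c) :
    Brd (t.take c) j := by
  obtain ⟨hc1, hcf⟩ := (brd_iff t c).mp hbc
  obtain ⟨hj1, hjf⟩ := (brd_iff t j).mp hbj
  have hlc : (t.take c).length = c := by rw [List.length_take]; omega
  refine (brd_iff _ _).mpr ⟨by rw [hlc]; omega, fun x hx => ?_⟩
  rw [hlc]
  rw [List.getElem?_take, if_pos (by omega), List.getElem?_take, if_pos (by omega)]
  have h2 := hcf (c - j + x) (by omega)
  rw [show t.length - c + (c - j + x) = t.length - j + x by omega] at h2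
  rw [hjf x hx, h2]

-- the while loop, run from any border k of t.take i that dominates all matching borders,
-- ends at a border r that still dominates all matching borders and either is 0 or matches
lemma inner_lemma (t : List Char) (i : Nat) (pi : List Int)
    (Hpi : ∀ j, j < i → pi[j]? = some ((mb (t.take (j+1)) : Int))) :
    ∀ (fuel k : Nat), k < fuel → Brd (t.take i) k →
      (∀ j, Brd (t.take i) j → t[j]? = t[i]? → j ≤ k) →
      ∃ r : Nat, pvKmpInner pi t (i : Int) fuel (k : Int) = (r : Int) ∧
        Brd (t.take i) r ∧ (∀ j, Brd (t.take i) j → t[j]? = t[i]? → j ≤ r) ∧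
        (r = 0 ∨ t[r]? = t[i]?) := by
  intro fuel
  induction fuel with
  | zero => intro k hk; omega
  | succ fuel ih =>
    intro k hk hbrd hmax
    have hki : k < i := by
      have := hbrd.1; rw [List.length_take] at this; omega
    by_cases hc : 0 < (k : Int) ∧ PySem.List.pyGet? t (i : Int) ≠ PySem.List.pyGet? t (k : Int)
    · have hk0 : 0 < k := by exact_mod_cast hc.1
      have hne : t[i]? ≠ t[k]? := by
        have := hc.2
        rwa [PySem.List.pyGet?_natCast, PySem.List.pyGet?_natCast] at this
      have hpik : pi[k-1]? = some ((mb (t.take k) : Int)) := by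
        have := Hpi (k-1) (by omega)
        rwa [Nat.sub_add_cancel hk0] at this
      have hstep : pvKmpInner pi t (i : Int) (fuel+1) (k : Int)
          = pvKmpInner pi t (i : Int) fuel ((mb (t.take k) : Int)) := by
        simp only [pvKmpInner]
        rw [if_pos hc, show (k : Int) - 1 = ((k - 1 : Nat) : Int) by omega,
          PySem.List.pyGet?_natCast, hpik, Option.getD_some]
      have htk : (t.take i).take k = t.take k := by
        rw [List.take_take]; congr 1; omega
      have hbk : Brd (t.take k) (mb (t.take k)) := by
        apply mb_brd
        rw [List.length_take]
        have := hbrd.1; rw [List.length_take] at this; omega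
      have hb' : Brd (t.take i) (mb (t.take k)) := brd_trans hbrd (htk ▸ hbk)
      have hlt : mb (t.take k) < k := by
        have := hbk.1; rw [List.length_take] at this; omega
      have hmax' : ∀ j, Brd (t.take i) j → t[j]? = t[i]? → j ≤ mb (t.take k) := by
        intro j hbj hje
        have hjk : j < k := by
          have := hmax j hbj hje
          rcases Nat.lt_or_ge j k with h | h
          · exact h
          · exfalso; have : j = k := by omega
            subst this; exact hne hje.symm
        have hres : Brd ((t.take i).take k) j := brd_take hbj hbrd hjk
        rw [htk] at hres
        exact mb_ge hres
      obtain ⟨r, hr, h1, h2, h3⟩ := ih (mb (t.take k)) (by omega) hb' hmax'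
      exact ⟨r, by rw [hstep]; exact hr, h1, h2, h3⟩
    · refine ⟨k, ?_, hbrd, hmax, ?_⟩
      · simp only [pvKmpInner]; rw [if_neg hc]
      · by_cases hk0 : k = 0
        · left; exact hk0
        · right
          have h0 : 0 < (k : Int) := by exact_mod_cast Nat.pos_of_ne_zero hk0
          have : ¬ PySem.List.pyGet? t (i : Int) ≠ PySem.List.pyGet? t (k : Int) := fun h => hc ⟨h0, h⟩
          have heq : PySem.List.pyGet? t (i : Int) = PySem.List.pyGet? t (k : Int) := not_not.mp this
          rw [PySem.List.pyGet?_natCast, PySem.List.pyGet?_natCast] at heq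
          exact heq.symm

-- one iteration of the outer loop advances the prefix-function value
lemma step_eq (t : List Char) (i : Nat) (pi : List Int) (hi : i < t.length) (hi0 : 0 < i)
    (Hpi : ∀ j, j < i → pi[j]? = some ((mb (t.take (j+1)) : Int))) :
    pvKmpStep pi t i ((mb (t.take i) : Int)) = ((mb (t.take (i+1)) : Int)) := by
  obtain ⟨r, hr, h1, h2, h3⟩ := inner_lemma t i pi Hpi (mb (t.take i) + 1) (mb (t.take i))
    (by omega)
    (mb_brd (by rw [List.length_take]; omega))
    (fun j hb _ => mb_ge hb)
  unfold pvKmpStep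
  simp only [Int.toNat_natCast]
  rw [hr, PySem.List.pyGet?_natCast, PySem.List.pyGet?_natCast]
  by_cases hm : t[i]? = t[r]?
  · rw [if_pos hm]
    have hb : Brd (t.take (i+1)) (r+1) := (brd_ext t i r hi).mpr ⟨h1, hm.symm⟩
    have hge : r + 1 ≤ mb (t.take (i+1)) := mb_ge hb
    have hle : mb (t.take (i+1)) ≤ r + 1 := by
      cases hM : mb (t.take (i+1)) with
      | zero => omega
      | succ c =>
        have hbM : Brd (t.take (i+1)) (c+1) := by
          have := mb_brd (t := t.take (i+1)) (by rw [List.length_take]; omega)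
          rwa [hM] at this
        obtain ⟨hbc, hce⟩ := (brd_ext t i c hi).mp hbM
        have := h2 c hbc hce; omega
    rw [show mb (t.take (i+1)) = r + 1 by omega]
    push_cast; ring
  · rw [if_neg hm]
    have hr0 : r = 0 := by
      rcases h3 with h | h
      · exact h
      · exact absurd h.symm hm
    have hM0 : mb (t.take (i+1)) = 0 := by
      cases hM : mb (t.take (i+1)) with
      | zero => rfl
      | succ c =>
        exfalso
        have hbM : Brd (t.take (i+1)) (c+1) := by
          have := mb_brd (t := t.take (i+1)) (by rw [List.length_take]; omega)
          rwa [hM] at this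
        obtain ⟨hbc, hce⟩ := (brd_ext t i c hi).mp hbM
        have hcr : c ≤ r := h2 c hbc hce
        have hc0 : c = 0 := by omega
        subst hc0
        rw [hr0] at hm
        exact hm hce.symm
    rw [hr0, hM0]

-- the outer loop fills pi with the prefix-function values
lemma go_lemma (t : List Char) : ∀ (d i : Nat) (k : Int) (pi : List Int),
    t.length - i ≤ d → 0 < i → i ≤ t.length → pi.length = t.length →
    k = ((mb (t.take i) : Int)) →
    (∀ j, j < i → pi[j]? = some ((mb (t.take (j+1)) : Int))) →
    ∀ j, j < t.length → (pvKmpGo t t.length i k pi)[j]? = some ((mb (t.take (j+1)) : Int)) := by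
  intro d
  induction d with
  | zero =>
    intro i k pi hd h0 hle hlen hk Hpi j hj
    rw [pvKmpGo, if_neg (by omega)]
    exact Hpi j (by omega)
  | succ d ih =>
    intro i k pi hd h0 hle hlen hk Hpi j hj
    by_cases hi : i < t.length
    · rw [pvKmpGo, if_pos hi]
      rw [hk, step_eq t i pi hi h0 Hpi]
      apply ih (i+1) _ _ (by omega) (by omega) (by omega)
        (by rw [List.length_set]; exact hlen) rfl _ j hj
      intro j' hj'
      by_cases hji : j' = i
      · subst hji
        exact List.getElem?_set_self (by omega)
      · rw [List.getElem?_set_ne (by omega)]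
        exact Hpi j' (by omega)
    · rw [pvKmpGo, if_neg hi]
      exact Hpi j (by omega)

lemma t_len (cs : List Char) : (cs.reverse ++ Char.ofNat 0 :: cs).length = 2*cs.length + 1 := by
  simp [List.length_append]; omega

-- B computes the longest proper border of reverse(s) ++ '\x00' :: s
lemma alt_eq (s : String) :
    longest_suffix_palindrome_len_alt s
      = ((mb (s.toList.reverse ++ Char.ofNat 0 :: s.toList) : Int)) := by
  set t := s.toList.reverse ++ Char.ofNat 0 :: s.toList with ht
  have hm : t.length = 2*s.toList.length + 1 := t_len s.toList
  have h1 : mb (t.take 1) = 0 := by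
    unfold mb
    rw [show (t.take 1).length - 1 = 0 by rw [List.length_take]; omega]
    exact Nat.findGreatest_zero
  have Hpi0 : ∀ j, j < 1 → (List.replicate t.length (0:Int))[j]? = some ((mb (t.take (j+1)) : Int)) := by
    intro j hj
    have hj0 : j = 0 := by omega
    subst hj0
    rw [List.getElem?_replicate, if_pos (by omega), h1]
    rfl
  have hgo := go_lemma t t.length 1 0 (List.replicate t.length (0:Int)) (by omega) (by omega)
    (by omega) (by simp) (by rw [h1]; rfl) Hpi0 (t.length - 1) (by omega)
  show (PySem.List.pyGet? (pvKmpGo t t.length 1 0 (List.replicate t.length 0)) ((t.length : Int) - 1)).getD 0 = _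
  rw [show ((t.length : Int) - 1) = ((t.length - 1 : Nat) : Int) by omega,
    PySem.List.pyGet?_natCast, hgo]
  rw [show t.length - 1 + 1 = t.length by omega, List.take_length]
  rfl

-- ===== A-side: A equals the first-palindromic-suffix scan pvScanH =====

-- proof-only helper: scan starts ascending, return n - start at the first palindromic suffix
def pvScanH (cs : List Char) (start : Nat) : Int :=
  if start < cs.length then
    let t := cs.drop start
    if t = t.reverse then (cs.length : Int) - (start : Int)
    else pvScanH cs (start + 1)
  else 0
termination_by cs.length - start

-- lists of length ≤ 1 are palindromes
lemma pv_short_pal {l : List Char} (h : l.length ≤ 1) : l = l.reverse := by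
  match l, h with
  | [], _ => rfl
  | [a], _ => rfl

-- palindrome splits at the two ends
lemma pv_pal_split (a b : Char) (mid : List Char) :
    (a :: (mid ++ [b])) = (a :: (mid ++ [b])).reverse ↔ (a = b ∧ mid = mid.reverse) := by
  constructor
  · intro h
    have h' : a :: (mid ++ [b]) = b :: (mid.reverse ++ [a]) := by
      conv_lhs => rw [h]
      simp
    obtain ⟨hab, h2⟩ := List.cons_eq_cons.mp h'
    exact ⟨hab, (List.append_inj' h2 (by simp)).1⟩
  · rintro ⟨hab, hm⟩
    subst hab
    have hrev : (a :: (mid ++ [a])).reverse = a :: (mid.reverse ++ [a]) := by simp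
    rw [hrev, ← hm]

-- the segment cs[i..j] decomposes into first char, middle, last char
lemma pv_seg_split (cs : List Char) (i j : Nat) (hij : i < j) (hj : j < cs.length) :
    (cs.drop i).take (j + 1 - i)
      = cs[i] :: (((cs.drop (i + 1)).take (j - 1 + 1 - (i + 1))) ++ [cs[j]]) := by
  have hi : i < cs.length := lt_trans hij hj
  rw [List.drop_eq_getElem_cons hi]
  have h1 : j + 1 - i = (j - i - 1) + 1 + 1 := by omega
  rw [h1, List.take_succ_cons]
  congr 1
  have hlen : j - i - 1 < (cs.drop (i + 1)).length := by simp; omega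
  have h2 : (cs.drop (i + 1)).take (j - i - 1 + 1)
      = (cs.drop (i + 1)).take (j - i - 1) ++ [(cs.drop (i + 1))[j - i - 1]] := by
    rw [List.take_add_one, List.getElem?_eq_getElem hlen]
    rfl
  rw [h2]
  have h3 : (cs.drop (i + 1))[j - i - 1] = cs[j] := by
    rw [List.getElem_drop]
    congr 1
    omega
  rw [h3]
  congr 2
  omega

-- A's inner two-pointer loop decides whether cs[i..j] is a palindrome
lemma pv_inner_eq (cs : List Char) : ∀ (d i j : Nat), j - i ≤ d → j < cs.length →
    pvInnerA cs (i : Int) (j : Int)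
      = if ((cs.drop i).take (j + 1 - i)) = ((cs.drop i).take (j + 1 - i)).reverse then 1 else 0 := by
  intro d
  induction d with
  | zero =>
    intro i j hd hj
    have hnlt : ¬ ((i : Int) < (j : Int)) := by exact_mod_cast (by omega : ¬ i < j)
    rw [pvInnerA, if_neg hnlt]
    have : ((cs.drop i).take (j + 1 - i)).length ≤ 1 := by
      simp [List.length_take]
      omega
    rw [if_pos (pv_short_pal this)]
  | succ d ih =>
    intro i j hd hj
    by_cases hlt : i < j
    · have hi : i < cs.length := lt_trans hlt hj
      have hilt : (i : Int) < (j : Int) := by exact_mod_cast hlt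
      rw [pvInnerA, if_pos hilt]
      rw [PySem.List.pyGet?_natCast, PySem.List.pyGet?_natCast,
        List.getElem?_eq_getElem hi, List.getElem?_eq_getElem hj]
      simp only
      rw [pv_seg_split cs i j hlt hj]
      by_cases hab : cs[i] = cs[j]
      · rw [if_neg (by simpa using hab)]
        have hcast1 : (i : Int) + 1 = ((i + 1 : Nat) : Int) := by push_cast; ring
        have hcast2 : (j : Int) - 1 = ((j - 1 : Nat) : Int) := by omega
        rw [hcast1, hcast2, ih (i + 1) (j - 1) (by omega) (by omega)]
        by_cases hm : (cs.drop (i + 1)).take (j - 1 + 1 - (i + 1))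
            = ((cs.drop (i + 1)).take (j - 1 + 1 - (i + 1))).reverse
        · rw [if_pos hm, if_pos ((pv_pal_split _ _ _).mpr ⟨hab, hm⟩)]
        · rw [if_neg hm, if_neg (fun h => hm ((pv_pal_split _ _ _).mp h).2)]
      · rw [if_pos (by simpa using hab)]
        rw [if_neg (fun h => hab ((pv_pal_split _ _ _).mp h).1)]
    · have hnlt : ¬ ((i : Int) < (j : Int)) := by exact_mod_cast hlt
      rw [pvInnerA, if_neg hnlt]
      have : ((cs.drop i).take (j + 1 - i)).length ≤ 1 := by
        simp [List.length_take]
        omega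
      rw [if_pos (pv_short_pal this)]

-- pvScanH never exceeds the length of the remaining suffix and is nonnegative
lemma pv_scan_bounds (cs : List Char) : ∀ (d start : Nat), cs.length - start ≤ d →
    0 ≤ pvScanH cs start ∧ pvScanH cs start ≤ (cs.length : Int) - (start : Int) ∨
      (¬ start < cs.length ∧ pvScanH cs start = 0) := by
  intro d
  induction d with
  | zero =>
    intro start h
    by_cases hs : start < cs.length
    · omega
    · right; exact ⟨hs, by rw [pvScanH, if_neg hs]⟩
  | succ d ih =>
    intro start h
    by_cases hs : start < cs.length
    · left
      rw [pvScanH, if_pos hs]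
      simp only
      split_ifs with hp
      · constructor <;> omega
      · rcases ih (start + 1) (by omega) with ⟨h1, h2⟩ | ⟨_, h0⟩
        · constructor <;> [exact h1; omega]
        · rw [h0]; constructor <;> omega
    · right; exact ⟨hs, by rw [pvScanH, if_neg hs]⟩

-- the outer loop of A, fed with the scan's answer for the already-visited suffixes, ends at it
lemma pv_outer_inv (cs : List Char) : ∀ (k : Nat) (start : Int), start + 1 = k →
    start ≤ (cs.length : Int) - 1 →
    pvOuterA cs (cs.length : Int) (pvScanH cs (start + 1).toNat) start = pvScanH cs 0 := by
  intro k
  induction k with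
  | zero =>
    intro start hk _
    have hneg : ¬ (0 ≤ start) := by omega
    rw [pvOuterA, dif_neg hneg]
    congr 1
    omega
  | succ k ih =>
    intro start hk hle
    have h0 : 0 ≤ start := by omega
    have hklen : k < cs.length := by omega
    have hstart : start = (k : Int) := by omega
    have hn1 : (cs.length : Int) - 1 = ((cs.length - 1 : Nat) : Int) := by omega
    rw [pvOuterA, dif_pos h0]
    simp only
    rw [hstart, hn1, pv_inner_eq cs (cs.length) k (cs.length - 1) (by omega) (by omega)]
    have htake : (cs.drop k).take (cs.length - 1 + 1 - k) = cs.drop k := by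
      apply List.take_of_length_le
      simp
      omega
    rw [htake]
    have hsucc : ((k : Int) + 1).toNat = k + 1 := by omega
    have hself : ((k : Int) - 1 + 1).toNat = k := by omega
    have hscan : pvScanH cs k
        = if cs.drop k = (cs.drop k).reverse then (cs.length : Int) - (k : Int)
          else pvScanH cs (k + 1) := by
      rw [pvScanH, if_pos hklen]
    by_cases hp : cs.drop k = (cs.drop k).reverse
    · rw [if_pos hp, hsucc]
      have hbd : pvScanH cs (k + 1) < (cs.length : Int) - (k : Int) := by
        rcases pv_scan_bounds cs cs.length (k + 1) (by omega) with ⟨_, h2⟩ | ⟨_, h0'⟩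
        · omega
        · omega
      rw [if_pos ⟨rfl, hbd⟩]
      have hbest : (cs.length : Int) - (k : Int) = pvScanH cs ((k : Int) - 1 + 1).toNat := by
        rw [hself, hscan, if_pos hp]
      rw [hbest]
      exact ih ((k : Int) - 1) (by omega) (by omega)
    · rw [if_neg hp, hsucc]
      have hne : ¬ ((0 : Int) = 1 ∧ (cs.length : Int) - (k : Int) > pvScanH cs (k + 1)) := by
        rintro ⟨h, _⟩; exact absurd h (by decide)
      rw [if_neg hne]
      have hbest : pvScanH cs (k + 1) = pvScanH cs ((k : Int) - 1 + 1).toNat := by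
        rw [hself, hscan, if_neg hp]
      rw [hbest]
      exact ih ((k : Int) - 1) (by omega) (by omega)

-- A equals the ascending scan
lemma a_eq (s : String) : longest_suffix_palindrome_len s = pvScanH s.toList 0 := by
  unfold longest_suffix_palindrome_len
  set cs := s.toList with hcs
  by_cases hlen : cs.length = 0
  · rw [hlen]
    rw [pvOuterA, dif_neg (by norm_num)]
    rw [pvScanH, if_neg (by omega)]
  · have hzero : (0 : Int) = pvScanH cs ((((cs.length : Int) - 1) + 1).toNat) := by
      have h : (((cs.length : Int) - 1) + 1).toNat = cs.length := by omega
      rw [h, pvScanH, if_neg (by omega)]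
    rw [hzero]
    exact pv_outer_inv cs cs.length ((cs.length : Int) - 1) (by omega) (by omega)

-- the scan computes the greatest palindromic-suffix length
lemma scan_eq (cs : List Char) : ∀ (d start : Nat), cs.length - start ≤ d →
    pvScanH cs start = ((Nat.findGreatest (PalSuf cs) (cs.length - start) : Int)) := by
  intro d
  induction d with
  | zero =>
    intro start h
    rw [pvScanH, if_neg (by omega), show cs.length - start = 0 by omega,
      Nat.findGreatest_zero]
    rfl
  | succ d ih =>
    intro start h
    by_cases hs : start < cs.length
    · rw [pvScanH, if_pos hs]
      simp only
      rw [show cs.length - start = (cs.length - start - 1) + 1 by omega, Nat.findGreatest_succ]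
      have harg : cs.length - (cs.length - start - 1 + 1) = start := by omega
      have hcond : PalSuf cs (cs.length - start - 1 + 1) ↔ (cs.drop start = (cs.drop start).reverse) := by
        unfold PalSuf
        rw [harg]
      by_cases hp : cs.drop start = (cs.drop start).reverse
      · rw [if_pos hp, if_pos (hcond.mpr hp)]
        push_cast
        omega
      · rw [if_neg hp, if_neg (fun hh => hp (hcond.mp hh))]
        rw [ih (start + 1) (by omega), show cs.length - (start + 1) = cs.length - start - 1 by omega]
    · rw [pvScanH, if_neg hs, show cs.length - start = 0 by omega, Nat.findGreatest_zero]
      rfl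

-- ===== under Dom, borders of t = reverse(s) ++ '\x00' :: s are palindromic suffixes =====

lemma brd_le_n (cs : List Char) (hdom : ∀ c ∈ cs, pvDomChar c = true) (k : Nat)
    (hb : Brd (cs.reverse ++ Char.ofNat 0 :: cs) k) : k ≤ cs.length := by
  by_contra hgt
  rw [Nat.not_le] at hgt
  obtain ⟨hk, hf⟩ := (brd_iff _ _).mp hb
  have hm := t_len cs
  have h1 := hf (k - cs.length - 1) (by omega)
  rw [show (cs.reverse ++ Char.ofNat 0 :: cs).length - k + (k - cs.length - 1) = cs.length by omega] at h1
  have hrev : k - cs.length - 1 < cs.reverse.length := by simp; omega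
  rw [List.getElem?_append_left hrev, List.getElem?_eq_getElem hrev,
    List.getElem?_append_right (by simp), show cs.length - cs.reverse.length = 0 by simp] at h1
  simp only [List.getElem?_cons_zero, Option.some_inj] at h1
  have hc : cs.reverse[k - cs.length - 1] ∈ cs := List.mem_reverse.mp (List.getElem_mem hrev)
  have := hdom _ hc
  rw [h1] at this
  exact absurd this (by decide)

lemma brd_iff_pal (cs : List Char) (k : Nat) (hk : k ≤ cs.length) :
    Brd (cs.reverse ++ Char.ofNat 0 :: cs) k ↔ PalSuf cs k := by
  have hm := t_len cs
  have h1 : (cs.reverse ++ Char.ofNat 0 :: cs).take k = (cs.drop (cs.length - k)).reverse := by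
    rw [List.take_append_of_le_length (by simp [hk]), List.take_reverse]
  have h2 : (cs.reverse ++ Char.ofNat 0 :: cs).drop ((cs.reverse ++ Char.ofNat 0 :: cs).length - k)
      = cs.drop (cs.length - k) := by
    rw [List.drop_append, List.drop_eq_nil_of_le (by simp; omega), List.nil_append,
      List.length_reverse,
      show (cs.reverse ++ Char.ofNat 0 :: cs).length - k - cs.length = (cs.length - k) + 1 by omega,
      List.drop_succ_cons]
  constructor
  · rintro ⟨_, h⟩
    rw [h1, h2] at h
    exact h.symm
  · intro h
    exact ⟨by omega, by rw [h1, h2]; exact h.symm⟩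

lemma mb_eq (cs : List Char) (hdom : ∀ c ∈ cs, pvDomChar c = true) :
    mb (cs.reverse ++ Char.ofNat 0 :: cs) = Nat.findGreatest (PalSuf cs) cs.length := by
  have hm := t_len cs
  apply le_antisymm
  · have hb := mb_brd (t := cs.reverse ++ Char.ofNat 0 :: cs) (by omega)
    have hle := brd_le_n cs hdom _ hb
    exact Nat.le_findGreatest hle ((brd_iff_pal cs _ hle).mp hb)
  · have hP : PalSuf cs (Nat.findGreatest (PalSuf cs) cs.length) :=
      Nat.findGreatest_spec (Nat.zero_le _) (by unfold PalSuf; simp)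
    have hle : Nat.findGreatest (PalSuf cs) cs.length ≤ cs.length := Nat.findGreatest_le _
    exact mb_ge ((brd_iff_pal cs _ hle).mpr hP)

-- ===== VERDICT (by name: the statement is the Claim_ definition above) =====
theorem longest_suffix_palindrome_len_spec : Claim_equal_longest_suffix_palindrome_len := by
  intro s hdom
  unfold Spec_longest_suffix_palindrome_len
  have hdom' : ∀ c ∈ s.toList, pvDomChar c = true := by
    unfold Dom_longest_suffix_palindrome_len pvDomStr at hdom
    simpa [List.all_eq_true] using hdom
  rw [a_eq, alt_eq, scan_eq s.toList s.toList.length 0 (by omega), Nat.sub_zero,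
    mb_eq s.toList hdom']
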